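-- pv_equiv track=rewrite | github.com/edizucar/the-automatic-accountant | data_analysis/analysis_testing.py | getSector
-- ===== SOURCE A (Python) =====
-- def getSector(SIC: int) -> str:
--     """
--     Returns the sector of a company given its SIC number.
--     """
--     SICs = [(1110,3220,"A"), (5101,9900,"B"), (10110,33200,"C"), (35110, 35300, "D"), (36000, 39000, "E"), (41100,43999,"F"), (45111,47990,"G"),
--             (49100,53202,"H"), (55100,56302,"I"), (58110,63990,"J"), (64110,66300,"K"), (68100,68320,"L"), (69101,75000,"M"), (77110,82990,"N"),
--             (84110,84300,"O"), (85100,85600,"P"), (86101,88990,"Q"), (90010,93290,"R"), (94110,96090,"S"), (97000,98200,"T"), (99000,99999,"U")]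
--     for s in SICs:
--         if s[0] <= SIC <= s[1]:
--             return s[2]
--     raise Exception("Invalid SIC")
-- ===== SOURCE B (Python) =====
-- def getSector(SIC: int) -> str:
--     """
--     Returns the sector of a company given its SIC number.
--     Binary search over the sorted lower bounds, then one upper-bound check.
--     """
--     LOWS = [1110, 5101, 10110, 35110, 36000, 41100, 45111, 49100, 55100, 58110,
--             64110, 68100, 69101, 77110, 84110, 85100, 86101, 90010, 94110, 97000, 99000]
--     HIGHS = [3220, 9900, 33200, 35300, 39000, 43999, 47990, 53202, 56302, 63990,
--              66300, 68320, 75000, 82990, 84300, 85600, 88990, 93290, 96090, 98200, 99999]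
--     LETTERS = "ABCDEFGHIJKLMNOPQRSTU"
--     # bisect_right over LOWS, written out (A imports nothing, so no bisect module)
--     lo, hi = 0, len(LOWS)
--     while lo < hi:
--         mid = (lo + hi) // 2
--         if LOWS[mid] <= SIC:
--             lo = mid + 1
--         else:
--             hi = mid
--     if lo == 0 or SIC > HIGHS[lo - 1]:
--         raise Exception("Invalid SIC")
--     return LETTERS[lo - 1]
-- ===== Notes on version B (the rewrite author's own statement) =====
-- stated objective: alternative
-- what changed: Replaces A's linear scan over the (low, high, letter) interval triples with a hand-written bisect_right binary search over the sorted lower bounds followed by a single upper-bound check.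
import Mathlib
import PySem

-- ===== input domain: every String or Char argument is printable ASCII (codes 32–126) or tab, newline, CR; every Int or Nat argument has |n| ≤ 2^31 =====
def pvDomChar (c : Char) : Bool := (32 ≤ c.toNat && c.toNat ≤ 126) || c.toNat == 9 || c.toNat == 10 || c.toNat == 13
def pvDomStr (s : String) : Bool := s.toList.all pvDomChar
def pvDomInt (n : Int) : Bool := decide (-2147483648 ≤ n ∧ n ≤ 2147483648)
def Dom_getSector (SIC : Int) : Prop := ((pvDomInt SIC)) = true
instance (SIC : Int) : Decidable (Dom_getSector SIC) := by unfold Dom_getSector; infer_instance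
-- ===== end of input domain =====

-- B replaces A's linear scan of the interval table with a binary search over the lower
-- bounds plus one upper-bound check (objective: alternative). Both Pythons raise
-- Exception("Invalid SIC") on a SIC in no interval; Pre_ excludes exactly those inputs.

-- ===== PORT A =====
-- A's loop over the literal triple list; the raise path is outside Pre_ (marked "").
def getSectorScan (SIC : Int) : List (Int × Int × String) → String
  | [] => ""   -- Python: raise Exception("Invalid SIC"); outside Pre_
  | s :: rest => if s.1 ≤ SIC ∧ SIC ≤ s.2.1 then s.2.2 else getSectorScan SIC rest

def getSector (SIC : Int) : String :=
  getSectorScan SIC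
    [(1110,3220,"A"), (5101,9900,"B"), (10110,33200,"C"), (35110,35300,"D"),
     (36000,39000,"E"), (41100,43999,"F"), (45111,47990,"G"), (49100,53202,"H"),
     (55100,56302,"I"), (58110,63990,"J"), (64110,66300,"K"), (68100,68320,"L"),
     (69101,75000,"M"), (77110,82990,"N"), (84110,84300,"O"), (85100,85600,"P"),
     (86101,88990,"Q"), (90010,93290,"R"), (94110,96090,"S"), (97000,98200,"T"),
     (99000,99999,"U")]

-- ===== PORT B =====
def altLows : List Int :=
  [1110, 5101, 10110, 35110, 36000, 41100, 45111, 49100, 55100, 58110,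
   64110, 68100, 69101, 77110, 84110, 85100, 86101, 90010, 94110, 97000, 99000]
def altHighs : List Int :=
  [3220, 9900, 33200, 35300, 39000, 43999, 47990, 53202, 56302, 63990,
   66300, 68320, 75000, 82990, 84300, 85600, 88990, 93290, 96090, 98200, 99999]
def altLetters : List Char := "ABCDEFGHIJKLMNOPQRSTU".toList

-- Source B's while-loop binary search; fuel 5 exceeds ⌈log₂ (table length)⌉, enough steps for the search to finish;
-- a totality guard only. All list indices are in range, so List.getD is exact here.
def altBisect (SIC : Int) : Nat → Nat → Nat → Nat
  | 0, lo, _ => lo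
  | fuel + 1, lo, hi =>
    if lo < hi then
      let mid := (lo + hi) / 2
      if altLows.getD mid 0 ≤ SIC then altBisect SIC fuel (mid + 1) hi
      else altBisect SIC fuel lo mid
    else lo

def getSector_alt (SIC : Int) : String :=
  let lo := altBisect SIC 5 0 21
  if lo = 0 ∨ SIC > altHighs.getD (lo - 1) 0 then ""   -- Python: raise; outside Pre_
  else String.ofList [altLetters.getD (lo - 1) ' ']

-- ===== PRECONDITION & SPEC =====
-- Pre_ excludes exactly the inputs on which the Python A raises Exception("Invalid SIC"):
-- SICs lying in none of the intervals.
def Pre_getSector (SIC : Int) : Prop :=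
  (1110 ≤ SIC ∧ SIC ≤ 3220) ∨ (5101 ≤ SIC ∧ SIC ≤ 9900) ∨ (10110 ≤ SIC ∧ SIC ≤ 33200) ∨
  (35110 ≤ SIC ∧ SIC ≤ 35300) ∨ (36000 ≤ SIC ∧ SIC ≤ 39000) ∨ (41100 ≤ SIC ∧ SIC ≤ 43999) ∨
  (45111 ≤ SIC ∧ SIC ≤ 47990) ∨ (49100 ≤ SIC ∧ SIC ≤ 53202) ∨ (55100 ≤ SIC ∧ SIC ≤ 56302) ∨
  (58110 ≤ SIC ∧ SIC ≤ 63990) ∨ (64110 ≤ SIC ∧ SIC ≤ 66300) ∨ (68100 ≤ SIC ∧ SIC ≤ 68320) ∨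
  (69101 ≤ SIC ∧ SIC ≤ 75000) ∨ (77110 ≤ SIC ∧ SIC ≤ 82990) ∨ (84110 ≤ SIC ∧ SIC ≤ 84300) ∨
  (85100 ≤ SIC ∧ SIC ≤ 85600) ∨ (86101 ≤ SIC ∧ SIC ≤ 88990) ∨ (90010 ≤ SIC ∧ SIC ≤ 93290) ∨
  (94110 ≤ SIC ∧ SIC ≤ 96090) ∨ (97000 ≤ SIC ∧ SIC ≤ 98200) ∨ (99000 ≤ SIC ∧ SIC ≤ 99999)
instance (SIC : Int) : Decidable (Pre_getSector SIC) := by unfold Pre_getSector; infer_instance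

def pvWitness_getSector : Int := (1110)

def Spec_getSector (SIC : Int) (out : String) : Prop := out = getSector_alt SIC
instance (SIC : Int) (out : String) : Decidable (Spec_getSector SIC out) := by unfold Spec_getSector; infer_instance

-- ===== CLAIM (what is proved, stated in full; the proofs are below) =====
def Claim_equal_getSector : Prop := ∀ (SIC : Int), Dom_getSector SIC → Pre_getSector SIC → Spec_getSector SIC (getSector SIC)

-- ===== LEMMAS AND PROOFS =====

theorem pvScanTree (SIC : Int) : getSector SIC = (if 1110 ≤ SIC ∧ SIC ≤ 3220 then "A" else if 5101 ≤ SIC ∧ SIC ≤ 9900 then "B" else if 10110 ≤ SIC ∧ SIC ≤ 33200 then "C" else if 35110 ≤ SIC ∧ SIC ≤ 35300 then "D" else if 36000 ≤ SIC ∧ SIC ≤ 39000 then "E" else if 41100 ≤ SIC ∧ SIC ≤ 43999 then "F" else if 45111 ≤ SIC ∧ SIC ≤ 47990 then "G" else if 49100 ≤ SIC ∧ SIC ≤ 53202 then "H" else if 55100 ≤ SIC ∧ SIC ≤ 56302 then "I" else if 58110 ≤ SIC ∧ SIC ≤ 63990 then "J" else if 64110 ≤ SIC ∧ SIC ≤ 66300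 then "K" else if 68100 ≤ SIC ∧ SIC ≤ 68320 then "L" else if 69101 ≤ SIC ∧ SIC ≤ 75000 then "M" else if 77110 ≤ SIC ∧ SIC ≤ 82990 then "N" else if 84110 ≤ SIC ∧ SIC ≤ 84300 then "O" else if 85100 ≤ SIC ∧ SIC ≤ 85600 then "P" else if 86101 ≤ SIC ∧ SIC ≤ 88990 then "Q" else if 90010 ≤ SIC ∧ SIC ≤ 93290 then "R" else if 94110 ≤ SIC ∧ SIC ≤ 96090 then "S" else if 97000 ≤ SIC ∧ SIC ≤ 98200 then "T" else if 99000 ≤ SIC ∧ SIC ≤ 99999 then "U" else "") := by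
  unfold getSector
  simp only [getSectorScan]

theorem pvBisTree (SIC : Int) : altBisect SIC 5 0 21 = (if 64110 ≤ SIC then (if 86101 ≤ SIC then (if 97000 ≤ SIC then (if 99000 ≤ SIC then 21 else 20) else (if 94110 ≤ SIC then 19 else (if 90010 ≤ SIC then 18 else 17))) else (if 77110 ≤ SIC then (if 85100 ≤ SIC then 16 else (if 84110 ≤ SIC then 15 else 14)) else (if 69101 ≤ SIC then 13 else (if 68100 ≤ SIC then 12 else 11)))) else (if 41100 ≤ SIC then (if 55100 ≤ SIC then (if 58110 ≤ SIC then 10 else 9) else (if 49100 ≤ SIC then 8 else (if 45111 ≤ SIC then 7 else 6))) else (if 10110 ≤ SIC then (if 36000 ≤ SIC then 5 else (if 35110 ≤ SIC then 4 else 3)) else (if 5101 ≤ SIC then 2 else (if 1110 ≤ SIC then 1 else 0))))) := by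
  simp only [altBisect, altLows, List.getD, List.getElem?_cons_zero, List.getElem?_cons_succ,
    Option.getD]
  norm_num

theorem pvAltEval (SIC : Int) (k : Nat) (h : altBisect SIC 5 0 21 = k) :
    getSector_alt SIC =
      (if k = 0 ∨ SIC > altHighs.getD (k - 1) 0 then "" else String.ofList [altLetters.getD (k - 1) ' ']) := by
  unfold getSector_alt
  rw [h]

theorem pvScan_0 (SIC : Int) (h1 : 1110 ≤ SIC) (h2 : SIC ≤ 3220) : getSector SIC = "A" := by
  rw [pvScanTree]
  rw [if_pos (by omega)]

theorem pvBis_0 (SIC : Int) (h1 : 1110 ≤ SIC) (h2 : SIC ≤ 3220) : getSector_alt SIC = "A" := by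
  rw [pvAltEval SIC 1 (by rw [pvBisTree]; rw [if_neg (by omega), if_neg (by omega), if_neg (by omega), if_neg (by omega), if_pos (by omega)])]
  rw [if_neg (by norm_num [altHighs, List.getD]; omega)]
  rfl

theorem pvScan_1 (SIC : Int) (h1 : 5101 ≤ SIC) (h2 : SIC ≤ 9900) : getSector SIC = "B" := by
  rw [pvScanTree]
  rw [if_neg (by omega)]
  rw [if_pos (by omega)]

theorem pvBis_1 (SIC : Int) (h1 : 5101 ≤ SIC) (h2 : SIC ≤ 9900) : getSector_alt SIC = "B" := by
  rw [pvAltEval SIC 2 (by rw [pvBisTree]; rw [if_neg (by omega), if_neg (by omega), if_neg (by omega), if_pos (by omega)])]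
  rw [if_neg (by norm_num [altHighs, List.getD]; omega)]
  rfl

theorem pvScan_2 (SIC : Int) (h1 : 10110 ≤ SIC) (h2 : SIC ≤ 33200) : getSector SIC = "C" := by
  rw [pvScanTree]
  rw [if_neg (by omega)]
  rw [if_neg (by omega)]
  rw [if_pos (by omega)]

theorem pvBis_2 (SIC : Int) (h1 : 10110 ≤ SIC) (h2 : SIC ≤ 33200) : getSector_alt SIC = "C" := by
  rw [pvAltEval SIC 3 (by rw [pvBisTree]; rw [if_neg (by omega), if_neg (by omega), if_pos (by omega), if_neg (by omega), if_neg (by omega)])]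
  rw [if_neg (by norm_num [altHighs, List.getD]; omega)]
  rfl

theorem pvScan_3 (SIC : Int) (h1 : 35110 ≤ SIC) (h2 : SIC ≤ 35300) : getSector SIC = "D" := by
  rw [pvScanTree]
  rw [if_neg (by omega)]
  rw [if_neg (by omega)]
  rw [if_neg (by omega)]
  rw [if_pos (by omega)]

theorem pvBis_3 (SIC : Int) (h1 : 35110 ≤ SIC) (h2 : SIC ≤ 35300) : getSector_alt SIC = "D" := by
  rw [pvAltEval SIC 4 (by rw [pvBisTree]; rw [if_neg (by omega), if_neg (by omega), if_pos (by omega), if_neg (by omega), if_pos (by omega)])]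
  rw [if_neg (by norm_num [altHighs, List.getD]; omega)]
  rfl

theorem pvScan_4 (SIC : Int) (h1 : 36000 ≤ SIC) (h2 : SIC ≤ 39000) : getSector SIC = "E" := by
  rw [pvScanTree]
  rw [if_neg (by omega)]
  rw [if_neg (by omega)]
  rw [if_neg (by omega)]
  rw [if_neg (by omega)]
  rw [if_pos (by omega)]

theorem pvBis_4 (SIC : Int) (h1 : 36000 ≤ SIC) (h2 : SIC ≤ 39000) : getSector_alt SIC = "E" := by
  rw [pvAltEval SIC 5 (by rw [pvBisTree]; rw [if_neg (by omega), if_neg (by omega), if_pos (by omega), if_pos (by omega)])]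
  rw [if_neg (by norm_num [altHighs, List.getD]; omega)]
  rfl

theorem pvScan_5 (SIC : Int) (h1 : 41100 ≤ SIC) (h2 : SIC ≤ 43999) : getSector SIC = "F" := by
  rw [pvScanTree]
  rw [if_neg (by omega)]
  rw [if_neg (by omega)]
  rw [if_neg (by omega)]
  rw [if_neg (by omega)]
  rw [if_neg (by omega)]
  rw [if_pos (by omega)]

theorem pvBis_5 (SIC : Int) (h1 : 41100 ≤ SIC) (h2 : SIC ≤ 43999) : getSector_alt SIC = "F" := by
  rw [pvAltEval SIC 6 (by rw [pvBisTree]; rw [if_neg (by omega), if_pos (by omega), if_neg (by omega), if_neg (by omega), if_neg (by omega)])]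
  rw [if_neg (by norm_num [altHighs, List.getD]; omega)]
  rfl

theorem pvScan_6 (SIC : Int) (h1 : 45111 ≤ SIC) (h2 : SIC ≤ 47990) : getSector SIC = "G" := by
  rw [pvScanTree]
  rw [if_neg (by omega)]
  rw [if_neg (by omega)]
  rw [if_neg (by omega)]
  rw [if_neg (by omega)]
  rw [if_neg (by omega)]
  rw [if_neg (by omega)]
  rw [if_pos (by omega)]

theorem pvBis_6 (SIC : Int) (h1 : 45111 ≤ SIC) (h2 : SIC ≤ 47990) : getSector_alt SIC = "G" := by
  rw [pvAltEval SIC 7 (by rw [pvBisTree]; rw [if_neg (by omega), if_pos (by omega), if_neg (by omega), if_neg (by omega), if_pos (by omega)])]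
  rw [if_neg (by norm_num [altHighs, List.getD]; omega)]
  rfl

theorem pvScan_7 (SIC : Int) (h1 : 49100 ≤ SIC) (h2 : SIC ≤ 53202) : getSector SIC = "H" := by
  rw [pvScanTree]
  rw [if_neg (by omega)]
  rw [if_neg (by omega)]
  rw [if_neg (by omega)]
  rw [if_neg (by omega)]
  rw [if_neg (by omega)]
  rw [if_neg (by omega)]
  rw [if_neg (by omega)]
  rw [if_pos (by omega)]

theorem pvBis_7 (SIC : Int) (h1 : 49100 ≤ SIC) (h2 : SIC ≤ 53202) : getSector_alt SIC = "H" := by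
  rw [pvAltEval SIC 8 (by rw [pvBisTree]; rw [if_neg (by omega), if_pos (by omega), if_neg (by omega), if_pos (by omega)])]
  rw [if_neg (by norm_num [altHighs, List.getD]; omega)]
  rfl

theorem pvScan_8 (SIC : Int) (h1 : 55100 ≤ SIC) (h2 : SIC ≤ 56302) : getSector SIC = "I" := by
  rw [pvScanTree]
  rw [if_neg (by omega)]
  rw [if_neg (by omega)]
  rw [if_neg (by omega)]
  rw [if_neg (by omega)]
  rw [if_neg (by omega)]
  rw [if_neg (by omega)]
  rw [if_neg (by omega)]
  rw [if_neg (by omega)]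
  rw [if_pos (by omega)]

theorem pvBis_8 (SIC : Int) (h1 : 55100 ≤ SIC) (h2 : SIC ≤ 56302) : getSector_alt SIC = "I" := by
  rw [pvAltEval SIC 9 (by rw [pvBisTree]; rw [if_neg (by omega), if_pos (by omega), if_pos (by omega), if_neg (by omega)])]
  rw [if_neg (by norm_num [altHighs, List.getD]; omega)]
  rfl

theorem pvScan_9 (SIC : Int) (h1 : 58110 ≤ SIC) (h2 : SIC ≤ 63990) : getSector SIC = "J" := by
  rw [pvScanTree]
  rw [if_neg (by omega)]
  rw [if_neg (by omega)]
  rw [if_neg (by omega)]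
  rw [if_neg (by omega)]
  rw [if_neg (by omega)]
  rw [if_neg (by omega)]
  rw [if_neg (by omega)]
  rw [if_neg (by omega)]
  rw [if_neg (by omega)]
  rw [if_pos (by omega)]

theorem pvBis_9 (SIC : Int) (h1 : 58110 ≤ SIC) (h2 : SIC ≤ 63990) : getSector_alt SIC = "J" := by
  rw [pvAltEval SIC 10 (by rw [pvBisTree]; rw [if_neg (by omega), if_pos (by omega), if_pos (by omega), if_pos (by omega)])]
  rw [if_neg (by norm_num [altHighs, List.getD]; omega)]
  rfl

theorem pvScan_10 (SIC : Int) (h1 : 64110 ≤ SIC) (h2 : SIC ≤ 66300) : getSector SIC = "K" := by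
  rw [pvScanTree]
  rw [if_neg (by omega)]
  rw [if_neg (by omega)]
  rw [if_neg (by omega)]
  rw [if_neg (by omega)]
  rw [if_neg (by omega)]
  rw [if_neg (by omega)]
  rw [if_neg (by omega)]
  rw [if_neg (by omega)]
  rw [if_neg (by omega)]
  rw [if_neg (by omega)]
  rw [if_pos (by omega)]

theorem pvBis_10 (SIC : Int) (h1 : 64110 ≤ SIC) (h2 : SIC ≤ 66300) : getSector_alt SIC = "K" := by
  rw [pvAltEval SIC 11 (by rw [pvBisTree]; rw [if_pos (by omega), if_neg (by omega), if_neg (by omega), if_neg (by omega), if_neg (by omega)])]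
  rw [if_neg (by norm_num [altHighs, List.getD]; omega)]
  rfl

theorem pvScan_11 (SIC : Int) (h1 : 68100 ≤ SIC) (h2 : SIC ≤ 68320) : getSector SIC = "L" := by
  rw [pvScanTree]
  rw [if_neg (by omega)]
  rw [if_neg (by omega)]
  rw [if_neg (by omega)]
  rw [if_neg (by omega)]
  rw [if_neg (by omega)]
  rw [if_neg (by omega)]
  rw [if_neg (by omega)]
  rw [if_neg (by omega)]
  rw [if_neg (by omega)]
  rw [if_neg (by omega)]
  rw [if_neg (by omega)]
  rw [if_pos (by omega)]

theorem pvBis_11 (SIC : Int) (h1 : 68100 ≤ SIC) (h2 : SIC ≤ 68320) : getSector_alt SIC = "L" := by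
  rw [pvAltEval SIC 12 (by rw [pvBisTree]; rw [if_pos (by omega), if_neg (by omega), if_neg (by omega), if_neg (by omega), if_pos (by omega)])]
  rw [if_neg (by norm_num [altHighs, List.getD]; omega)]
  rfl

theorem pvScan_12 (SIC : Int) (h1 : 69101 ≤ SIC) (h2 : SIC ≤ 75000) : getSector SIC = "M" := by
  rw [pvScanTree]
  rw [if_neg (by omega)]
  rw [if_neg (by omega)]
  rw [if_neg (by omega)]
  rw [if_neg (by omega)]
  rw [if_neg (by omega)]
  rw [if_neg (by omega)]
  rw [if_neg (by omega)]
  rw [if_neg (by omega)]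
  rw [if_neg (by omega)]
  rw [if_neg (by omega)]
  rw [if_neg (by omega)]
  rw [if_neg (by omega)]
  rw [if_pos (by omega)]

theorem pvBis_12 (SIC : Int) (h1 : 69101 ≤ SIC) (h2 : SIC ≤ 75000) : getSector_alt SIC = "M" := by
  rw [pvAltEval SIC 13 (by rw [pvBisTree]; rw [if_pos (by omega), if_neg (by omega), if_neg (by omega), if_pos (by omega)])]
  rw [if_neg (by norm_num [altHighs, List.getD]; omega)]
  rfl

theorem pvScan_13 (SIC : Int) (h1 : 77110 ≤ SIC) (h2 : SIC ≤ 82990) : getSector SIC = "N" := by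
  rw [pvScanTree]
  rw [if_neg (by omega)]
  rw [if_neg (by omega)]
  rw [if_neg (by omega)]
  rw [if_neg (by omega)]
  rw [if_neg (by omega)]
  rw [if_neg (by omega)]
  rw [if_neg (by omega)]
  rw [if_neg (by omega)]
  rw [if_neg (by omega)]
  rw [if_neg (by omega)]
  rw [if_neg (by omega)]
  rw [if_neg (by omega)]
  rw [if_neg (by omega)]
  rw [if_pos (by omega)]

theorem pvBis_13 (SIC : Int) (h1 : 77110 ≤ SIC) (h2 : SIC ≤ 82990) : getSector_alt SIC = "N" := by
  rw [pvAltEval SIC 14 (by rw [pvBisTree]; rw [if_pos (by omega), if_neg (by omega), if_pos (by omega), if_neg (by omega), if_neg (by omega)])]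
  rw [if_neg (by norm_num [altHighs, List.getD]; omega)]
  rfl

theorem pvScan_14 (SIC : Int) (h1 : 84110 ≤ SIC) (h2 : SIC ≤ 84300) : getSector SIC = "O" := by
  rw [pvScanTree]
  rw [if_neg (by omega)]
  rw [if_neg (by omega)]
  rw [if_neg (by omega)]
  rw [if_neg (by omega)]
  rw [if_neg (by omega)]
  rw [if_neg (by omega)]
  rw [if_neg (by omega)]
  rw [if_neg (by omega)]
  rw [if_neg (by omega)]
  rw [if_neg (by omega)]
  rw [if_neg (by omega)]
  rw [if_neg (by omega)]
  rw [if_neg (by omega)]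
  rw [if_neg (by omega)]
  rw [if_pos (by omega)]

theorem pvBis_14 (SIC : Int) (h1 : 84110 ≤ SIC) (h2 : SIC ≤ 84300) : getSector_alt SIC = "O" := by
  rw [pvAltEval SIC 15 (by rw [pvBisTree]; rw [if_pos (by omega), if_neg (by omega), if_pos (by omega), if_neg (by omega), if_pos (by omega)])]
  rw [if_neg (by norm_num [altHighs, List.getD]; omega)]
  rfl

theorem pvScan_15 (SIC : Int) (h1 : 85100 ≤ SIC) (h2 : SIC ≤ 85600) : getSector SIC = "P" := by
  rw [pvScanTree]
  rw [if_neg (by omega)]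
  rw [if_neg (by omega)]
  rw [if_neg (by omega)]
  rw [if_neg (by omega)]
  rw [if_neg (by omega)]
  rw [if_neg (by omega)]
  rw [if_neg (by omega)]
  rw [if_neg (by omega)]
  rw [if_neg (by omega)]
  rw [if_neg (by omega)]
  rw [if_neg (by omega)]
  rw [if_neg (by omega)]
  rw [if_neg (by omega)]
  rw [if_neg (by omega)]
  rw [if_neg (by omega)]
  rw [if_pos (by omega)]

theorem pvBis_15 (SIC : Int) (h1 : 85100 ≤ SIC) (h2 : SIC ≤ 85600) : getSector_alt SIC = "P" := by
  rw [pvAltEval SIC 16 (by rw [pvBisTree]; rw [if_pos (by omega), if_neg (by omega), if_pos (by omega), if_pos (by omega)])]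
  rw [if_neg (by norm_num [altHighs, List.getD]; omega)]
  rfl

theorem pvScan_16 (SIC : Int) (h1 : 86101 ≤ SIC) (h2 : SIC ≤ 88990) : getSector SIC = "Q" := by
  rw [pvScanTree]
  rw [if_neg (by omega)]
  rw [if_neg (by omega)]
  rw [if_neg (by omega)]
  rw [if_neg (by omega)]
  rw [if_neg (by omega)]
  rw [if_neg (by omega)]
  rw [if_neg (by omega)]
  rw [if_neg (by omega)]
  rw [if_neg (by omega)]
  rw [if_neg (by omega)]
  rw [if_neg (by omega)]
  rw [if_neg (by omega)]
  rw [if_neg (by omega)]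
  rw [if_neg (by omega)]
  rw [if_neg (by omega)]
  rw [if_neg (by omega)]
  rw [if_pos (by omega)]

theorem pvBis_16 (SIC : Int) (h1 : 86101 ≤ SIC) (h2 : SIC ≤ 88990) : getSector_alt SIC = "Q" := by
  rw [pvAltEval SIC 17 (by rw [pvBisTree]; rw [if_pos (by omega), if_pos (by omega), if_neg (by omega), if_neg (by omega), if_neg (by omega)])]
  rw [if_neg (by norm_num [altHighs, List.getD]; omega)]
  rfl

theorem pvScan_17 (SIC : Int) (h1 : 90010 ≤ SIC) (h2 : SIC ≤ 93290) : getSector SIC = "R" := by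
  rw [pvScanTree]
  rw [if_neg (by omega)]
  rw [if_neg (by omega)]
  rw [if_neg (by omega)]
  rw [if_neg (by omega)]
  rw [if_neg (by omega)]
  rw [if_neg (by omega)]
  rw [if_neg (by omega)]
  rw [if_neg (by omega)]
  rw [if_neg (by omega)]
  rw [if_neg (by omega)]
  rw [if_neg (by omega)]
  rw [if_neg (by omega)]
  rw [if_neg (by omega)]
  rw [if_neg (by omega)]
  rw [if_neg (by omega)]
  rw [if_neg (by omega)]
  rw [if_neg (by omega)]
  rw [if_pos (by omega)]

theorem pvBis_17 (SIC : Int) (h1 : 90010 ≤ SIC) (h2 : SIC ≤ 93290) : getSector_alt SIC = "R" := by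
  rw [pvAltEval SIC 18 (by rw [pvBisTree]; rw [if_pos (by omega), if_pos (by omega), if_neg (by omega), if_neg (by omega), if_pos (by omega)])]
  rw [if_neg (by norm_num [altHighs, List.getD]; omega)]
  rfl

theorem pvScan_18 (SIC : Int) (h1 : 94110 ≤ SIC) (h2 : SIC ≤ 96090) : getSector SIC = "S" := by
  rw [pvScanTree]
  rw [if_neg (by omega)]
  rw [if_neg (by omega)]
  rw [if_neg (by omega)]
  rw [if_neg (by omega)]
  rw [if_neg (by omega)]
  rw [if_neg (by omega)]
  rw [if_neg (by omega)]
  rw [if_neg (by omega)]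
  rw [if_neg (by omega)]
  rw [if_neg (by omega)]
  rw [if_neg (by omega)]
  rw [if_neg (by omega)]
  rw [if_neg (by omega)]
  rw [if_neg (by omega)]
  rw [if_neg (by omega)]
  rw [if_neg (by omega)]
  rw [if_neg (by omega)]
  rw [if_neg (by omega)]
  rw [if_pos (by omega)]

theorem pvBis_18 (SIC : Int) (h1 : 94110 ≤ SIC) (h2 : SIC ≤ 96090) : getSector_alt SIC = "S" := by
  rw [pvAltEval SIC 19 (by rw [pvBisTree]; rw [if_pos (by omega), if_pos (by omega), if_neg (by omega), if_pos (by omega)])]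
  rw [if_neg (by norm_num [altHighs, List.getD]; omega)]
  rfl

theorem pvScan_19 (SIC : Int) (h1 : 97000 ≤ SIC) (h2 : SIC ≤ 98200) : getSector SIC = "T" := by
  rw [pvScanTree]
  rw [if_neg (by omega)]
  rw [if_neg (by omega)]
  rw [if_neg (by omega)]
  rw [if_neg (by omega)]
  rw [if_neg (by omega)]
  rw [if_neg (by omega)]
  rw [if_neg (by omega)]
  rw [if_neg (by omega)]
  rw [if_neg (by omega)]
  rw [if_neg (by omega)]
  rw [if_neg (by omega)]
  rw [if_neg (by omega)]
  rw [if_neg (by omega)]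
  rw [if_neg (by omega)]
  rw [if_neg (by omega)]
  rw [if_neg (by omega)]
  rw [if_neg (by omega)]
  rw [if_neg (by omega)]
  rw [if_neg (by omega)]
  rw [if_pos (by omega)]

theorem pvBis_19 (SIC : Int) (h1 : 97000 ≤ SIC) (h2 : SIC ≤ 98200) : getSector_alt SIC = "T" := by
  rw [pvAltEval SIC 20 (by rw [pvBisTree]; rw [if_pos (by omega), if_pos (by omega), if_pos (by omega), if_neg (by omega)])]
  rw [if_neg (by norm_num [altHighs, List.getD]; omega)]
  rfl

theorem pvScan_20 (SIC : Int) (h1 : 99000 ≤ SIC) (h2 : SIC ≤ 99999) : getSector SIC = "U" := by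
  rw [pvScanTree]
  rw [if_neg (by omega)]
  rw [if_neg (by omega)]
  rw [if_neg (by omega)]
  rw [if_neg (by omega)]
  rw [if_neg (by omega)]
  rw [if_neg (by omega)]
  rw [if_neg (by omega)]
  rw [if_neg (by omega)]
  rw [if_neg (by omega)]
  rw [if_neg (by omega)]
  rw [if_neg (by omega)]
  rw [if_neg (by omega)]
  rw [if_neg (by omega)]
  rw [if_neg (by omega)]
  rw [if_neg (by omega)]
  rw [if_neg (by omega)]
  rw [if_neg (by omega)]
  rw [if_neg (by omega)]
  rw [if_neg (by omega)]
  rw [if_neg (by omega)]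
  rw [if_pos (by omega)]

theorem pvBis_20 (SIC : Int) (h1 : 99000 ≤ SIC) (h2 : SIC ≤ 99999) : getSector_alt SIC = "U" := by
  rw [pvAltEval SIC 21 (by rw [pvBisTree]; rw [if_pos (by omega), if_pos (by omega), if_pos (by omega), if_pos (by omega)])]
  rw [if_neg (by norm_num [altHighs, List.getD]; omega)]
  rfl

theorem getSector_spec : Claim_equal_getSector := by
  intro SIC _ hpre
  unfold Spec_getSector
  rcases hpre with h0|h1|h2|h3|h4|h5|h6|h7|h8|h9|h10|h11|h12|h13|h14|h15|h16|h17|h18|h19|h20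
  · rw [pvScan_0 SIC h0.1 h0.2, pvBis_0 SIC h0.1 h0.2]
  · rw [pvScan_1 SIC h1.1 h1.2, pvBis_1 SIC h1.1 h1.2]
  · rw [pvScan_2 SIC h2.1 h2.2, pvBis_2 SIC h2.1 h2.2]
  · rw [pvScan_3 SIC h3.1 h3.2, pvBis_3 SIC h3.1 h3.2]
  · rw [pvScan_4 SIC h4.1 h4.2, pvBis_4 SIC h4.1 h4.2]
  · rw [pvScan_5 SIC h5.1 h5.2, pvBis_5 SIC h5.1 h5.2]
  · rw [pvScan_6 SIC h6.1 h6.2, pvBis_6 SIC h6.1 h6.2]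
  · rw [pvScan_7 SIC h7.1 h7.2, pvBis_7 SIC h7.1 h7.2]
  · rw [pvScan_8 SIC h8.1 h8.2, pvBis_8 SIC h8.1 h8.2]
  · rw [pvScan_9 SIC h9.1 h9.2, pvBis_9 SIC h9.1 h9.2]
  · rw [pvScan_10 SIC h10.1 h10.2, pvBis_10 SIC h10.1 h10.2]
  · rw [pvScan_11 SIC h11.1 h11.2, pvBis_11 SIC h11.1 h11.2]
  · rw [pvScan_12 SIC h12.1 h12.2, pvBis_12 SIC h12.1 h12.2]
  · rw [pvScan_13 SIC h13.1 h13.2, pvBis_13 SIC h13.1 h13.2]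
  · rw [pvScan_14 SIC h14.1 h14.2, pvBis_14 SIC h14.1 h14.2]
  · rw [pvScan_15 SIC h15.1 h15.2, pvBis_15 SIC h15.1 h15.2]
  · rw [pvScan_16 SIC h16.1 h16.2, pvBis_16 SIC h16.1 h16.2]
  · rw [pvScan_17 SIC h17.1 h17.2, pvBis_17 SIC h17.1 h17.2]
  · rw [pvScan_18 SIC h18.1 h18.2, pvBis_18 SIC h18.1 h18.2]
  · rw [pvScan_19 SIC h19.1 h19.2, pvBis_19 SIC h19.1 h19.2]
  · rw [pvScan_20 SIC h20.1 h20.2, pvBis_20 SIC h20.1 h20.2]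

-- ===== VERDICT: getSector_spec above states Claim_equal_getSector by name =====
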